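-- pv_equiv track=rewrite | github.com/Anatolt/NeiroTolikBot | discord_app/voice_log.py | _sanitize_summary_text
-- ===== SOURCE A (Python) =====
-- def _sanitize_summary_text(text: str) -> str:
--     cleaned = (text or "").replace("\r", "\n").strip()
--     for token in ("**", "__", "*", "_", "`"):
--         cleaned = cleaned.replace(token, "")
--     for token in ("###", "##", "#", ">"):
--         cleaned = cleaned.replace(token, "")
--     lines = [line.strip() for line in cleaned.splitlines()]
--     return "\n".join(line for line in lines if line)
-- ===== SOURCE B (Python) =====
-- def _sanitize_summary_text(text: str) -> str:
--     cleaned = (text or "").replace("\r", "\n").strip()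
--     kept = []
--     for ch in cleaned:
--         if ch not in "*_`#>":
--             kept.append(ch)
--     lines = []
--     for line in "".join(kept).splitlines():
--         line = line.strip()
--         if line:
--             lines.append(line)
--     return "\n".join(lines)
-- ===== Notes on version B (the rewrite author's own statement) =====
-- stated objective: alternative
-- what changed: The nine sequential full-string replace passes over markdown tokens are replaced by a single character-filtering pass that drops the characters *, _, `, #, > (each removed token is a run of one such character), and the line-strip/join tail is written as explicit accumulator loops; it trades A's repeated C-level replace scans for one explicit pass over the characters.
import Mathlib
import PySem

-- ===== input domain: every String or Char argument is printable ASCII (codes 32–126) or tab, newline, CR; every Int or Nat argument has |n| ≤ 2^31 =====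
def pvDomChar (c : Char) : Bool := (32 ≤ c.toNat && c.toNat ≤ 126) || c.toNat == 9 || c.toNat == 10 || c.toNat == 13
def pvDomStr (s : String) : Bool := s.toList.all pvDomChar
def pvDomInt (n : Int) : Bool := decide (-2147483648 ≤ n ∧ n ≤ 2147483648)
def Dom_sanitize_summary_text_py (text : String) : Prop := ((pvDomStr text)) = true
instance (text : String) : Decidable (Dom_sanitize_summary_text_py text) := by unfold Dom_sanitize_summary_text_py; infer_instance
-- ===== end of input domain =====

-- B replaces A's nine sequential token-replace passes with one single character-filter pass
-- (the removed tokens are all runs of one of *, _, `, #, >); the line-strip/join tail is the same.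


-- ===== PORT A =====
def sanitize_summary_text_py (text : String) : String :=
  -- cleaned = (text or "").replace("\r", "\n").strip()
  let cleaned := PySem.Str.strip (PySem.Str.replace (if text == "" then "" else text) "\r" "\n")
  -- for token in ("**", "__", "*", "_", "`"): cleaned = cleaned.replace(token, "")
  let cleaned := ["**", "__", "*", "_", "`"].foldl (fun c tok => PySem.Str.replace c tok "") cleaned
  -- for token in ("###", "##", "#", ">"): cleaned = cleaned.replace(token, "")
  let cleaned := ["###", "##", "#", ">"].foldl (fun c tok => PySem.Str.replace c tok "") cleaned
  -- lines = [line.strip() for line in cleaned.splitlines()]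
  let lines := (PySem.Str.splitlines cleaned).map PySem.Str.strip
  -- "\n".join(line for line in lines if line)
  PySem.Str.join "\n" (lines.filter (fun l => l ≠ ""))

-- ===== PORT B =====
def sanitize_summary_text_py_alt (text : String) : String :=
  -- cleaned = (text or "").replace("\r", "\n").strip()
  let cleaned := PySem.Str.strip (PySem.Str.replace (if text == "" then "" else text) "\r" "\n")
  -- for ch in cleaned: if ch not in "*_`#>": kept.append(ch)
  -- ('ch in str' for a single character ch is exactly membership among the string's characters)
  let kept := cleaned.toList.foldl
    (fun acc ch => if !("*_`#>".toList.contains ch) then acc ++ [ch] else acc) []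
  -- for line in "".join(kept).splitlines(): line = line.strip(); if line: lines.append(line)
  -- ("".join over single-character pieces is exactly String.ofList)
  let lines := (PySem.Str.splitlines (String.ofList kept)).foldl
    (fun acc line => let l := PySem.Str.strip line; if l ≠ "" then acc ++ [l] else acc) []
  PySem.Str.join "\n" lines

-- ===== PRECONDITION & SPEC =====
def Spec_sanitize_summary_text_py (text : String) (out : String) : Prop := out = sanitize_summary_text_py_alt text
instance (text : String) (out : String) : Decidable (Spec_sanitize_summary_text_py text out) := by unfold Spec_sanitize_summary_text_py; infer_instance

-- ===== CLAIM (what is proved, stated in full; the proofs are below) =====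
def Claim_equal_sanitize_summary_text_py : Prop := ∀ (text : String), Dom_sanitize_summary_text_py text → Spec_sanitize_summary_text_py text (sanitize_summary_text_py text)

-- ===== LEMMAS AND PROOFS =====

-- replacing a single character by "" is exactly filtering that character out
theorem replace_go_single (c : Char) : ∀ (fuel : Nat) (l acc : List Char), l.length ≤ fuel →
    PySem.Chars.replace.go [c] [] fuel l acc = acc.reverse ++ l.filter (fun x => x != c) := by
  intro fuel
  induction fuel with
  | zero =>
    intro l acc h
    have : l = [] := List.eq_nil_of_length_eq_zero (Nat.le_zero.mp h)
    subst this
    simp [PySem.Chars.replace.go]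
  | succ n ih =>
    intro l acc h
    cases l with
    | nil => simp [PySem.Chars.replace.go]
    | cons x t =>
      have ht : t.length ≤ n := by simpa using h
      simp only [PySem.Chars.replace.go, List.isPrefixOf, Bool.and_true]
      by_cases hx : c = x
      · subst hx
        simp [ih t acc ht]
      · have : (c == x) = false := by simp [hx]
        rw [this]
        rw [ih t (x :: acc) ht]
        simp [Ne.symm hx, bne_iff_ne]

-- filtering c out after deleting a run-of-c token is the same as filtering c out directly
theorem replace_go_run (c : Char) (old : List Char) (hne : old ≠ []) (hall : ∀ x ∈ old, x = c) :
    ∀ (fuel : Nat) (l acc : List Char), l.length ≤ fuel →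
    (PySem.Chars.replace.go old [] fuel l acc).filter (fun x => x != c)
      = (acc.reverse ++ l).filter (fun x => x != c) := by
  intro fuel
  induction fuel with
  | zero =>
    intro l acc h
    have : l = [] := List.eq_nil_of_length_eq_zero (Nat.le_zero.mp h)
    subst this
    simp [PySem.Chars.replace.go]
  | succ n ih =>
    intro l acc h
    cases l with
    | nil => simp [PySem.Chars.replace.go]
    | cons x t =>
      simp only [PySem.Chars.replace.go]
      by_cases hp : old.isPrefixOf (x :: t) = true
      · rw [hp]
        simp only [if_true, List.reverse_nil, List.nil_append]
        have hpre : old <+: (x :: t) := List.isPrefixOf_iff_prefix.mp hp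
        have holdpos : 0 < old.length := List.length_pos_iff.mpr hne
        have hdl : ((x :: t).drop old.length).length ≤ n := by
          simp only [List.length_drop]
          simp only [List.length_cons] at h ⊢
          omega
        rw [ih _ acc hdl]
        have hsplit : (x :: t) = old ++ (x :: t).drop old.length :=
          (List.prefix_iff_eq_append.mp hpre).symm
        conv_rhs => rw [hsplit]
        have hfo : old.filter (fun x => x != c) = [] := by
          apply List.filter_eq_nil_iff.mpr
          intro a ha
          simp [hall a ha]
        simp [List.filter_append, hfo]
      · simp only [Bool.not_eq_true] at hp
        rw [hp]
        simp only [Bool.false_eq_true, if_false]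
        have ht : t.length ≤ n := by simpa using h
        rw [ih t (x :: acc) ht]
        simp

theorem replace_single (c : Char) (l : List Char) :
    PySem.Chars.replace l [c] [] = l.filter (fun x => x != c) := by
  rw [PySem.Chars.replace]
  simp only [List.isEmpty_cons, if_false, Bool.false_eq_true]
  simpa using replace_go_single c l.length l [] (le_refl _)

theorem replace_run (c : Char) (old : List Char) (hne : old ≠ []) (hall : ∀ x ∈ old, x = c)
    (l : List Char) :
    (PySem.Chars.replace l old []).filter (fun x => x != c) = l.filter (fun x => x != c) := by
  rw [PySem.Chars.replace]
  rw [if_neg (by simp [List.isEmpty_iff, hne])]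
  simpa using replace_go_run c old hne hall l.length l [] (le_refl _)

theorem filter_comm (p q : Char → Bool) (l : List Char) :
    (l.filter p).filter q = (l.filter q).filter p := by
  simp [List.filter_filter, Bool.and_comm]

-- A's nine ordered token replaces amount to deleting the five characters
theorem chain_eq (t : List Char) :
    PySem.Chars.replace (PySem.Chars.replace (PySem.Chars.replace (PySem.Chars.replace
      (PySem.Chars.replace (PySem.Chars.replace (PySem.Chars.replace (PySem.Chars.replace
      (PySem.Chars.replace t ['*','*'] []) ['_','_'] []) ['*'] []) ['_'] []) ['`'] [])
      ['#','#','#'] []) ['#','#'] []) ['#'] []) ['>'] []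
    = t.filter (fun ch => !(['*','_','`','#','>'].contains ch)) := by
  rw [replace_single '>', replace_single '#']
  rw [replace_run '#' ['#','#'] (by simp) (by intro x hx; simp at hx; simp [hx])]
  rw [replace_run '#' ['#','#','#'] (by simp) (by intro x hx; simp at hx; simp [hx])]
  rw [replace_single '`', replace_single '_', replace_single '*']
  rw [filter_comm (fun x => x != '*') (fun x => x != '_')]
  rw [replace_run '_' ['_','_'] (by simp) (by intro x hx; simp at hx; simp [hx])]
  rw [filter_comm (fun x => x != '_') (fun x => x != '*')]
  rw [replace_run '*' ['*','*'] (by simp) (by intro x hx; simp at hx; simp [hx])]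
  simp only [List.filter_filter]
  apply List.filter_congr
  intro x _
  by_cases h1 : x = '*' <;> by_cases h2 : x = '_' <;> by_cases h3 : x = '`' <;>
    by_cases h4 : x = '#' <;> by_cases h5 : x = '>' <;> simp [h1, h2, h3, h4, h5]

-- B's line loop equals A's map-strip-then-filter comprehension
theorem tail_eq (ls : List String) : ∀ (acc : List String),
    ls.foldl (fun acc line => let l := PySem.Str.strip line; if l ≠ "" then acc ++ [l] else acc) acc
      = acc ++ ((ls.map PySem.Str.strip).filter (fun l => l ≠ "")) := by
  induction ls with
  | nil => intro acc; simp
  | cons x t ih =>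
    intro acc
    rw [List.foldl_cons, ih]
    by_cases hx : PySem.Str.strip x = "" <;> simp [hx]

-- ===== VERDICT (by name: the statement is the Claim_ definition above) =====
theorem sanitize_summary_text_py_spec : Claim_equal_sanitize_summary_text_py := by
  intro text _
  unfold Spec_sanitize_summary_text_py sanitize_summary_text_py sanitize_summary_text_py_alt
  simp only [List.foldl_cons, List.foldl_nil]
  set s := PySem.Str.strip (PySem.Str.replace (if text == "" then "" else text) "\r" "\n") with hs
  have hkept : s.toList.foldl
      (fun acc ch => if !("*_`#>".toList.contains ch) then acc ++ [ch] else acc) []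
      = s.toList.filter (fun ch => !(['*','_','`','#','>'].contains ch)) := by
    rw [PySem.List.foldl_append_if_eq_filter]
    have : "*_`#>".toList = ['*','_','`','#','>'] := by decide
    rw [this]
    simp
  have hmid : PySem.Str.replace (PySem.Str.replace (PySem.Str.replace (PySem.Str.replace
      (PySem.Str.replace (PySem.Str.replace (PySem.Str.replace (PySem.Str.replace
      (PySem.Str.replace s "**" "") "__" "") "*" "") "_" "") "`" "")
      "###" "") "##" "") "#" "") ">" ""
      = String.ofList (s.toList.filter (fun ch => !(['*','_','`','#','>'].contains ch))) := by
    simp only [PySem.Str.replace, String.toList_ofList,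
      show "**".toList = ['*','*'] from by decide, show "__".toList = ['_','_'] from by decide,
      show "*".toList = ['*'] from by decide, show "_".toList = ['_'] from by decide,
      show "`".toList = ['`'] from by decide, show "###".toList = ['#','#','#'] from by decide,
      show "##".toList = ['#','#'] from by decide, show "#".toList = ['#'] from by decide,
      show ">".toList = ['>'] from by decide, show "".toList = ([] : List Char) from by decide]
    rw [chain_eq s.toList]
  rw [hmid, hkept, tail_eq]
  rw [List.nil_append]
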